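-- pv_equiv track=rewrite | github.com/yanez-compliance/MIID-subnet | MIID/validator/rule_evaluator.py | is_adjacent_consonants_swapped
-- ===== SOURCE A (Python) =====
-- def is_consonant(char: str) -> bool:
--     """Check if a character is a consonant (case-insensitive)"""
--     vowels = 'aeiou'
--     return char.isalpha() and char.lower() not in vowels
--
-- def is_adjacent_consonants_swapped(original: str, variation: str) -> bool:
--     """Check if two adjacent consonants are swapped."""
--     original_lower = original.lower()
--
--     if not any(is_consonant(original_lower[i]) and is_consonant(original_lower[i+1]) for i in range(len(original_lower)-1)):
--         return False
--
--     variation_lower = variation.lower()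
--
--     if len(original_lower) != len(variation_lower) or original_lower == variation_lower:
--         return False
--
--     for i in range(len(original_lower) - 1):
--         if is_consonant(original_lower[i]) and is_consonant(original_lower[i+1]):
--             test_str = list(original_lower)
--             test_str[i], test_str[i+1] = test_str[i+1], test_str[i]
--             if "".join(test_str) == variation_lower:
--                 return True
--     return False
-- ===== SOURCE B (Python) =====
-- def is_consonant(char: str) -> bool:
--     """Check if a character is a consonant (case-insensitive)"""
--     vowels = 'aeiou'
--     return char.isalpha() and char.lower() not in vowels
--
-- def is_adjacent_consonants_swapped(original: str, variation: str) -> bool: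
--     """Single pass: collect the differing positions; a valid variation has exactly
--     two, adjacent, cross-equal, both consonants."""
--     o = original.lower()
--     v = variation.lower()
--     if len(o) != len(v):
--         return False
--     diffs = [i for i, (a, b) in enumerate(zip(o, v)) if a != b]
--     if len(diffs) != 2:
--         return False
--     i, j = diffs
--     return (j == i + 1 and o[i] == v[j] and o[j] == v[i]
--             and is_consonant(o[i]) and is_consonant(o[j]))
-- ===== Notes on version B (the rewrite author's own statement) =====
-- stated objective: faster
-- what changed: Instead of trying every adjacent consonant pair and rebuilding the whole swapped string for comparison (O(n^2)), B makes one pass collecting the differing positions and checks that there are exactly two, adjacent, cross-equal consonant positions.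
import Mathlib
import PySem

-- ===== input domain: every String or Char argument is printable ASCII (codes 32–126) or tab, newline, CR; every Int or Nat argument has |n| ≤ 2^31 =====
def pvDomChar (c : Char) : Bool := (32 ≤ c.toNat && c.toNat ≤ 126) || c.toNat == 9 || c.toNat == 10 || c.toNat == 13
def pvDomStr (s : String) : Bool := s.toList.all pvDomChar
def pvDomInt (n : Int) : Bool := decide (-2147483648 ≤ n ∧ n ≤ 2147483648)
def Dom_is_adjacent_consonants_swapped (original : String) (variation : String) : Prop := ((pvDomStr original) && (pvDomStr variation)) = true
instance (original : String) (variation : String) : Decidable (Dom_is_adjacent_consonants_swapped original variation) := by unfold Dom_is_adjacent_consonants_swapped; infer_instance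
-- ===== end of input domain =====

-- B replaces A's try-every-adjacent-consonant-swap-and-rebuild-the-string scan with a
-- single pass over the differing positions (objective: faster); equivalence is proved
-- on all inputs (A is total, so there is no Pre_).

-- ===== PORT A =====
def pyIsConsonant (c : Char) : Bool :=
  PySem.Chars.isalpha c && !(['a','e','i','o','u'].contains (PySem.Chars.lowerChar c))

-- indices in A's loops satisfy 0 ≤ i and i+1 < len, so plain `getD` is exact here
def is_adjacent_consonants_swapped (original : String) (variation : String) : Bool :=
  let ol := PySem.Chars.lower original.toList
  if !((List.range (ol.length - 1)).any fun i =>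
        pyIsConsonant (ol.getD i ' ') && pyIsConsonant (ol.getD (i+1) ' ')) then false
  else
    let vl := PySem.Chars.lower variation.toList
    if ol.length ≠ vl.length ∨ ol = vl then false
    else
      (List.range (ol.length - 1)).any fun i =>
        pyIsConsonant (ol.getD i ' ') && pyIsConsonant (ol.getD (i+1) ' ') &&
        ((ol.set i (ol.getD (i+1) ' ')).set (i+1) (ol.getD i ' ') == vl)

-- ===== PORT B =====
-- the `[i for i, (a, b) in enumerate(zip(o, v)) if a != b]` comprehension of Source B
def pvDiffIdx : Nat → List (Char × Char) → List Nat
  | _, [] => []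
  | k, (a, b) :: rest => if a ≠ b then k :: pvDiffIdx (k+1) rest else pvDiffIdx (k+1) rest

def is_adjacent_consonants_swapped_alt (original : String) (variation : String) : Bool :=
  let o := PySem.Chars.lower original.toList
  let v := PySem.Chars.lower variation.toList
  if o.length ≠ v.length then false
  else
    match pvDiffIdx 0 (o.zip v) with
    | [i, j] =>
        j == i + 1 && o.getD i ' ' == v.getD j ' ' && o.getD j ' ' == v.getD i ' ' &&
        pyIsConsonant (o.getD i ' ') && pyIsConsonant (o.getD j ' ')
    | _ => false

-- ===== PRECONDITION & SPEC =====
def Spec_is_adjacent_consonants_swapped (original : String) (variation : String) (out : Bool) : Prop := out = is_adjacent_consonants_swapped_alt original variation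
instance (original : String) (variation : String) (out : Bool) : Decidable (Spec_is_adjacent_consonants_swapped original variation out) := by unfold Spec_is_adjacent_consonants_swapped; infer_instance

-- ===== CLAIM (what is proved, stated in full; the proofs are below) =====
def Claim_equal_is_adjacent_consonants_swapped : Prop := ∀ (original : String) (variation : String), Dom_is_adjacent_consonants_swapped original variation → Spec_is_adjacent_consonants_swapped original variation (is_adjacent_consonants_swapped original variation)

-- ===== LEMMAS AND PROOFS =====

theorem pvDiffIdx_eq (l : List (Char × Char)) : ∀ (k : Nat),
    pvDiffIdx k l =
      ((List.range l.length).filter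
        (fun m => (l.getD m (' ', ' ')).1 ≠ (l.getD m (' ', ' ')).2)).map (k + ·) := by
  induction l with
  | nil => intro k; simp [pvDiffIdx]
  | cons hd rest ih =>
    intro k
    obtain ⟨a, b⟩ := hd
    rw [pvDiffIdx]
    rw [show ((a,b)::rest).length = rest.length + 1 from rfl, List.range_succ_eq_map]
    rw [List.filter_cons, List.filter_map]
    simp only [List.getD_cons_zero]
    by_cases hab : a ≠ b
    · rw [if_pos hab, if_pos (by simpa using hab)]
      rw [ih (k+1)]
      simp only [List.map_cons, List.map_map]
      congr 1
      apply List.map_congr_left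
      intro m _
      simp [Function.comp]
      omega
    · rw [if_neg hab, if_neg (by simpa using hab)]
      rw [ih (k+1)]
      simp only [List.map_map]
      apply List.map_congr_left
      intro m _
      simp [Function.comp]
      omega

theorem pvDiffs_eq (ol vl : List Char) (h : ol.length = vl.length) :
    pvDiffIdx 0 (ol.zip vl) =
      (List.range ol.length).filter (fun m => ol.getD m ' ' ≠ vl.getD m ' ') := by
  rw [pvDiffIdx_eq]
  have hz : (ol.zip vl).length = ol.length := by
    rw [List.length_zip, ← h, Nat.min_self]
  rw [hz]
  rw [List.filter_congr (q := fun m => decide (ol.getD m ' ' ≠ vl.getD m ' ')) ?_]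
  · apply List.map_congr_left ?_ |>.trans (List.map_id _)
    intro m _; simp
  · intro m hm
    rw [List.mem_range] at hm
    have hmz : m < (ol.zip vl).length := by omega
    rw [List.getD_eq_getElem _ _ hmz, List.getElem_zip]
    show decide _ = decide _
    rw [List.getD_eq_getElem _ _ hm, List.getD_eq_getElem _ _ (by omega : m < vl.length)]

theorem pvSwap_eq_iff (ol vl : List Char) (h : ol.length = vl.length) (i : Nat)
    (hi : i + 1 < ol.length) :
    ((ol.set i (ol.getD (i+1) ' ')).set (i+1) (ol.getD i ' ') = vl) ↔
      (vl.getD i ' ' = ol.getD (i+1) ' ' ∧ vl.getD (i+1) ' ' = ol.getD i ' ' ∧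
        ∀ m, m < ol.length → m ≠ i → m ≠ i+1 → ol.getD m ' ' = vl.getD m ' ') := by
  constructor
  · intro he
    refine ⟨?_, ?_, ?_⟩
    · rw [← he]
      rw [List.getD_eq_getElem _ _ (by simpa using (by omega : i < ol.length)),
          List.getElem_set, List.getElem_set]
      simp
    · rw [← he]
      rw [List.getD_eq_getElem _ _ (by simpa using hi), List.getElem_set]
      simp
    · intro m hm hmi hmi1
      rw [← he]
      rw [List.getD_eq_getElem _ _ hm,
          List.getD_eq_getElem _ _ (show m < ((ol.set i (ol.getD (i+1) ' ')).set (i+1) (ol.getD i ' ')).length by simpa using hm),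
          List.getElem_set, List.getElem_set, if_neg (by omega), if_neg (by omega)]
  · rintro ⟨h1, h2, h3⟩
    apply List.ext_getElem
    · simpa using h
    · intro m hm hm2
      simp only [List.length_set] at hm
      rw [List.getElem_set, List.getElem_set]
      by_cases hmi1 : i + 1 = m
      · rw [if_pos hmi1]
        subst hmi1
        rw [List.getD_eq_getElem _ _ hm2] at h2
        rw [← h2]
      · rw [if_neg hmi1]
        by_cases hmi : i = m
        · rw [if_pos hmi]
          subst hmi
          rw [List.getD_eq_getElem _ _ (by omega : i < vl.length)] at h1
          rw [← h1]
        · rw [if_neg hmi]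
          have := h3 m hm (by omega) (by omega)
          rw [List.getD_eq_getElem _ _ hm, List.getD_eq_getElem _ _ (by omega)] at this
          exact this

theorem pvFilter_range_pair (i : Nat) (p : Nat → Bool) :
    ∀ n, i + 1 < n → (∀ m, m < n → (p m = true ↔ (m = i ∨ m = i + 1))) →
    (List.range n).filter p = [i, i+1] := by
  intro n
  induction n with
  | zero => omega
  | succ n ih =>
    intro hn hp
    rw [List.range_succ, List.filter_append]
    by_cases hcase : i + 1 < n
    · rw [ih hcase (fun m hm => hp m (by omega))]
      have : p n = false := by
        rw [Bool.eq_false_iff]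
        intro hpn
        have := (hp n (by omega)).mp hpn
        omega
      simp [this]
    · have hn2 : n = i + 1 := by omega
      subst hn2
      rw [List.range_succ, List.filter_append]
      have h1 : (List.range i).filter p = [] := by
        rw [List.filter_eq_nil_iff]
        intro m hm
        rw [List.mem_range] at hm
        intro hpm
        have := (hp m (by omega)).mp hpm
        omega
      rw [h1]
      have h2 : p i = true := (hp i (by omega)).mpr (Or.inl rfl)
      have h3 : p (i+1) = true := (hp (i+1) (by omega)).mpr (Or.inr rfl)
      simp [h2, h3]

theorem pvCore (ol vl : List Char) :
    (if !((List.range (ol.length - 1)).any fun i =>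
          pyIsConsonant (ol.getD i ' ') && pyIsConsonant (ol.getD (i+1) ' ')) then false
     else if ol.length ≠ vl.length ∨ ol = vl then false
     else (List.range (ol.length - 1)).any fun i =>
          pyIsConsonant (ol.getD i ' ') && pyIsConsonant (ol.getD (i+1) ' ') &&
          ((ol.set i (ol.getD (i+1) ' ')).set (i+1) (ol.getD i ' ') == vl))
    = (if ol.length ≠ vl.length then false
       else match pvDiffIdx 0 (ol.zip vl) with
         | [i, j] => j == i + 1 && ol.getD i ' ' == vl.getD j ' ' && ol.getD j ' ' == vl.getD i ' ' &&
             pyIsConsonant (ol.getD i ' ') && pyIsConsonant (ol.getD j ' ')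
         | _ => false) := by
  by_cases hlen : ol.length = vl.length
  · rw [if_neg (not_not_intro hlen)]
    by_cases heq : ol = vl
    · rw [if_pos (Or.inr heq)]
      subst heq
      rw [pvDiffs_eq _ _ rfl]
      rw [List.filter_eq_nil_iff.mpr (by intro m _; simp)]
      simp
    · have hcond : ¬(ol.length ≠ vl.length ∨ ol = vl) := by
        rintro (h | h)
        · exact h hlen
        · exact heq h
      have hC1 : ∀ hC : ((List.range (ol.length - 1)).any fun i =>
          pyIsConsonant (ol.getD i ' ') && pyIsConsonant (ol.getD (i+1) ' ')) = false,
          ((List.range (ol.length - 1)).any fun i =>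
          pyIsConsonant (ol.getD i ' ') && pyIsConsonant (ol.getD (i+1) ' ') &&
          ((ol.set i (ol.getD (i+1) ' ')).set (i+1) (ol.getD i ' ') == vl)) = false := by
        intro hC
        rw [List.any_eq_false] at hC ⊢
        intro x hx
        have h := hC x hx
        revert h
        cases pyIsConsonant (ol.getD x ' ') <;> cases pyIsConsonant (ol.getD (x+1) ' ') <;> simp
      have key : ((List.range (ol.length - 1)).any fun i =>
          pyIsConsonant (ol.getD i ' ') && pyIsConsonant (ol.getD (i+1) ' ') &&
          ((ol.set i (ol.getD (i+1) ' ')).set (i+1) (ol.getD i ' ') == vl))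
          = (match pvDiffIdx 0 (ol.zip vl) with
             | [i, j] => j == i + 1 && ol.getD i ' ' == vl.getD j ' ' && ol.getD j ' ' == vl.getD i ' ' &&
                 pyIsConsonant (ol.getD i ' ') && pyIsConsonant (ol.getD j ' ')
             | _ => false) := by
        rw [Bool.eq_iff_iff]
        constructor
        · intro hany
          rw [List.any_eq_true] at hany
          obtain ⟨i, hmem, hpred⟩ := hany
          rw [List.mem_range] at hmem
          have hi1 : i + 1 < ol.length := by omega
          simp only [Bool.and_eq_true, beq_iff_eq] at hpred
          obtain ⟨⟨c1, c2⟩, hsw⟩ := hpred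
          obtain ⟨e1, e2, hrest⟩ := (pvSwap_eq_iff ol vl hlen i hi1).mp hsw
          have hne_i : ol.getD i ' ' ≠ ol.getD (i+1) ' ' := by
            intro hcontr
            apply heq
            apply List.ext_getElem (by omega)
            intro m hm hm2
            rw [← List.getD_eq_getElem ol ' ' hm, ← List.getD_eq_getElem vl ' ' hm2]
            by_cases hmi : m = i
            · subst hmi; rw [e1, hcontr]
            · by_cases hmi1 : m = i + 1
              · subst hmi1; rw [e2, hcontr]
              · exact hrest m hm hmi hmi1
          have hp : ∀ m, m < ol.length →
              ((fun m => decide (ol.getD m ' ' ≠ vl.getD m ' ')) m = true ↔ (m = i ∨ m = i + 1)) := by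
            intro m hm
            rw [decide_eq_true_iff]
            constructor
            · intro hne
              by_contra hcon
              push Not at hcon
              exact hne (hrest m hm hcon.1 hcon.2)
            · rintro (rfl | rfl)
              · rw [e1]; exact hne_i
              · rw [e2]; exact fun hx => hne_i hx.symm
          rw [pvDiffs_eq _ _ hlen, pvFilter_range_pair i _ ol.length hi1 hp]
          simp only [Bool.and_eq_true, beq_iff_eq]
          exact ⟨⟨⟨⟨trivial, e2.symm⟩, e1.symm⟩, c1⟩, c2⟩
        · intro hmatch
          rcases hd : pvDiffIdx 0 (ol.zip vl) with _ | ⟨i, _ | ⟨j, _ | ⟨x, t⟩⟩⟩ <;>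
            rw [hd] at hmatch
          · simp at hmatch
          · simp at hmatch
          · simp only [Bool.and_eq_true, beq_iff_eq] at hmatch
            obtain ⟨⟨⟨⟨hj, e1⟩, e2⟩, c1⟩, c2⟩ := hmatch
            subst hj
            rw [pvDiffs_eq _ _ hlen] at hd
            have hi_mem : i ∈ (List.range ol.length).filter
                (fun m => decide (ol.getD m ' ' ≠ vl.getD m ' ')) := by rw [hd]; simp
            have hj_mem : i + 1 ∈ (List.range ol.length).filter
                (fun m => decide (ol.getD m ' ' ≠ vl.getD m ' ')) := by rw [hd]; simp
            rw [List.mem_filter, List.mem_range] at hi_mem hj_mem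
            rw [List.any_eq_true]
            refine ⟨i, by rw [List.mem_range]; omega, ?_⟩
            simp only [Bool.and_eq_true, beq_iff_eq]
            refine ⟨⟨c1, c2⟩, ?_⟩
            apply (pvSwap_eq_iff ol vl hlen i (by omega)).mpr
            refine ⟨e2.symm, e1.symm, ?_⟩
            intro m hm hmi hmi1
            by_contra hne
            have : m ∈ (List.range ol.length).filter
                (fun m => decide (ol.getD m ' ' ≠ vl.getD m ' ')) := by
              rw [List.mem_filter, List.mem_range]
              exact ⟨hm, by simpa using hne⟩
            rw [hd] at this
            simp at this
            omega
          · simp at hmatch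
      cases hC : ((List.range (ol.length - 1)).any fun i =>
          pyIsConsonant (ol.getD i ' ') && pyIsConsonant (ol.getD (i+1) ' ')) with
      | false =>
        rw [if_pos (by decide)]
        rw [hC1 hC] at key
        exact key
      | true =>
        rw [if_neg (by decide), if_neg hcond]
        exact key
  · rw [if_pos hlen]
    cases hC : ((List.range (ol.length - 1)).any fun i =>
        pyIsConsonant (ol.getD i ' ') && pyIsConsonant (ol.getD (i+1) ' ')) with
    | false => rw [if_pos (by decide)]
    | true => rw [if_neg (by decide), if_pos (Or.inl hlen)]

-- ===== VERDICT (by name: the statement is the Claim_ definition above) =====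
theorem is_adjacent_consonants_swapped_spec : Claim_equal_is_adjacent_consonants_swapped := by
  intro original variation _
  unfold Spec_is_adjacent_consonants_swapped is_adjacent_consonants_swapped is_adjacent_consonants_swapped_alt
  exact pvCore _ _
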